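-- pv_equiv track=rewrite | github.com/bencarnes/tomato_timer_for_microbit | tomato_timer.py | get_countdown_image
-- ===== SOURCE A (Python) =====
-- def get_countdown_image(count):
-- 	pixels = []
-- 	for i in range(25):
-- 		if i % 5 == 0 and i > 0:
-- 			pixels.append(':')
-- 		pixels.append('0' if i >= count else '5')
-- 	pixels.reverse()
-- 	return ''.join(pixels)
-- ===== SOURCE B (Python) =====
-- def get_countdown_image(count):
-- 	pixels = ['0' if i >= count else '5' for i in range(24, -1, -1)]
-- 	return ':'.join(''.join(pixels[r:r+5]) for r in range(0, 25, 5))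
-- ===== Notes on version B (the rewrite author's own statement) =====
-- stated objective: simpler
-- what changed: B builds the 25 pixel characters directly in reversed index order and chunk-and-joins five rows of five with ':', instead of A's single accumulating loop with inline colon insertion followed by a list reverse.
import Mathlib
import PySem

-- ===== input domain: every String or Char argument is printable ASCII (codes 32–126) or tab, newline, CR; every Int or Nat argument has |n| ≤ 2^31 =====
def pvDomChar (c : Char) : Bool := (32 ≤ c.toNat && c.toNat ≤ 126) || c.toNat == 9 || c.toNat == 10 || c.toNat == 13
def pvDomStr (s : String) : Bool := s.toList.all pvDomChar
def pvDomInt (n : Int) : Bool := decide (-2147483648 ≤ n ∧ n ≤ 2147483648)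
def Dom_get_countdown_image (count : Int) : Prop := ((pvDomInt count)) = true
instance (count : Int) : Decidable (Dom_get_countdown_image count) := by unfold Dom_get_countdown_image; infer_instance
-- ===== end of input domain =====

-- B builds the 25 pixel characters directly in reversed index order and then
-- chunk-and-joins five rows with ':' (objective: simpler decomposition, no inline
-- colon insertion and no trailing reverse).


-- ===== PORT A =====
-- pixels accumulated left to right, colon inserted before each row except the first,
-- then the whole list reversed and joined.
def get_countdown_image (count : Int) : String :=
  let pixels : List Char :=
    (PySem.List.pyRange 0 25 1).foldl
      (fun acc i =>
        let acc := if PySem.Int.mod i 5 == 0 && decide (i > 0) then acc ++ [':'] else acc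
        acc ++ [if i ≥ count then '0' else '5'])
      []
  String.ofList pixels.reverse

-- ===== PORT B =====
-- pixel strings in reversed index order, then five slices of five joined with ':'.
def get_countdown_image_alt (count : Int) : String :=
  let pixels : List String :=
    (PySem.List.pyRange 24 (-1) (-1)).map (fun i => if i ≥ count then "0" else "5")
  PySem.Str.join ":"
    ((PySem.List.pyRange 0 25 5).map
      (fun r => PySem.Str.join "" (PySem.List.slice pixels (some r) (some (r + 5)))))

-- ===== PRECONDITION & SPEC =====
def Spec_get_countdown_image (count : Int) (out : String) : Prop := out = get_countdown_image_alt count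
instance (count : Int) (out : String) : Decidable (Spec_get_countdown_image count out) := by unfold Spec_get_countdown_image; infer_instance

-- ===== CLAIM (what is proved, stated in full; the proofs are below) =====
def Claim_equal_get_countdown_image : Prop := ∀ (count : Int), Dom_get_countdown_image count → Spec_get_countdown_image count (get_countdown_image count)

-- ===== LEMMAS AND PROOFS =====

-- Both ports only look at count through the comparisons count ≤ i for 0 ≤ i ≤ 24,
-- so they agree with the run on the clamped count.
theorem A_clamp (count c : Int) (h : ∀ i : Int, 0 ≤ i → i < 25 → (count ≤ i ↔ c ≤ i)) :
    get_countdown_image count = get_countdown_image c := by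
  unfold get_countdown_image
  have := PySem.List.foldl_congr_mem' (l := PySem.List.pyRange 0 25 1) (init := ([] : List Char))
    (f := fun acc i =>
        (if PySem.Int.mod i 5 == 0 && decide (i > 0) then acc ++ [':'] else acc)
          ++ [if i ≥ count then '0' else '5'])
    (g := fun acc i =>
        (if PySem.Int.mod i 5 == 0 && decide (i > 0) then acc ++ [':'] else acc)
          ++ [if i ≥ c then '0' else '5'])
    (by
      intro x hx acc
      rw [PySem.List.mem_pyRange_one] at hx
      simp only [ge_iff_le, h x hx.1 hx.2])
  simp only [this]

theorem B_clamp (count c : Int) (h : ∀ i : Int, 0 ≤ i → i < 25 → (count ≤ i ↔ c ≤ i)) :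
    get_countdown_image_alt count = get_countdown_image_alt c := by
  unfold get_countdown_image_alt
  have hm : ((PySem.List.pyRange 24 (-1) (-1)).map (fun i => if i ≥ count then "0" else "5"))
      = ((PySem.List.pyRange 24 (-1) (-1)).map (fun i => if i ≥ c then "0" else "5")) := by
    apply List.map_congr_left
    intro x hx
    rw [PySem.List.mem_pyRange_neg_one] at hx
    simp only [ge_iff_le, h x (by omega) (by omega)]
  simp only [hm]

-- ===== VERDICT (by name: the statement is the Claim_ definition above) =====
theorem get_countdown_image_spec : Claim_equal_get_countdown_image := by
  intro count _
  unfold Spec_get_countdown_image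
  obtain ⟨c, h0, h1, hc⟩ : ∃ c : Int, 0 ≤ c ∧ c ≤ 25 ∧ c = max 0 (min 25 count) :=
    ⟨_, by omega, by omega, rfl⟩
  have hiff : ∀ i : Int, 0 ≤ i → i < 25 → (count ≤ i ↔ c ≤ i) := by
    intro i hi0 hi25; omega
  rw [A_clamp count c hiff, B_clamp count c hiff]
  interval_cases c <;> decide
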